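-- pv_equiv track=rewrite | github.com/kgryczan/excelbi_puzzles | Excel/800-899/872/872 Challenge.py | alternate_vowel_uppercase
-- ===== SOURCE A (Python) =====
-- def alternate_vowel_uppercase(s):
--     vowels = "aeiouAEIOU"
--     count = 0
--     res = []
--     for c in s:
--         if c in vowels:
--             count += 1
--             res.append(c.upper() if count % 2 == 0 else c)
--         else:
--             res.append(c)
--     return "".join(res)
-- ===== SOURCE B (Python) =====
-- def alternate_vowel_uppercase(s):
--     vowels = "aeiouAEIOU"
--     positions = [i for i, c in enumerate(s) if c in vowels]
--     chars = list(s)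
--     for i in positions[1::2]:
--         chars[i] = chars[i].upper()
--     return "".join(chars)
-- ===== Notes on version B (the rewrite author's own statement) =====
-- stated objective: alternative
-- what changed: A's single stateful scan with a running vowel counter is replaced by a two-phase plan: one pass collects the indices of all vowels, then every other collected index (the 2nd, 4th, ...) is uppercased in place in the character list.
import Mathlib
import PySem

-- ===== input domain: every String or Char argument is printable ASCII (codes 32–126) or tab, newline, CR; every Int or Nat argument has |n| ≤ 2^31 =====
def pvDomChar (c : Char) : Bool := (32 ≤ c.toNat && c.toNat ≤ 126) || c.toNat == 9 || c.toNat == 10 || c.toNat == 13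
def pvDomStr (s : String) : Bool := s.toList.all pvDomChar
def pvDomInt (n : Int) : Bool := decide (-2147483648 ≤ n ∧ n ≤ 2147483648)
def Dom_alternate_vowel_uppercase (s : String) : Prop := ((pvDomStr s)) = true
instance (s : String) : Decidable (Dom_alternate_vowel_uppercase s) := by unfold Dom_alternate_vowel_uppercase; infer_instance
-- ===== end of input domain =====

-- B replaces A's running-vowel-count scan by a vowel-index table whose every other
-- entry is uppercased in place (objective: alternative decomposition, no speed claim).

-- the Python constant vowels = "aeiouAEIOU", shared by both programs
def pvVowels : List Char := "aeiouAEIOU".toList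

-- ===== PORT A =====
def alternate_vowel_uppercase (s : String) : String :=
  -- loop state = (count, res); 'c in vowels' on a single char is list membership
  let r := s.toList.foldl
    (fun (st : Int × List Char) c =>
      if pvVowels.contains c then
        (st.1 + 1,
         st.2 ++ [if PySem.Int.mod (st.1 + 1) 2 == 0 then PySem.Chars.upperChar c else c])
      else (st.1, st.2 ++ [c]))
    (0, [])
  String.ofList r.2     -- "".join(res): res is a list of single characters

-- ===== PORT B =====
def alternate_vowel_uppercase_alt (s : String) : String :=
  let cs := s.toList
  let positions : List Int :=
    ((PySem.List.enumerate cs 0).filter (fun p => pvVowels.contains p.2)).map (·.1)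
  let sel : List Int :=
    match PySem.List.slice? positions (some 1) none 2 with   -- positions[1::2]
    | some l => l
    | none => []                                             -- unreachable: step 2 ≠ 0
  -- chars[i] = chars[i].upper(); every i is a valid index, so the total forms are exact
  let chars := sel.foldl
    (fun (l : List Char) i =>
      PySem.List.pySetD l i (PySem.Chars.upperChar (PySem.List.pyGetD l i ' '))) cs
  String.ofList chars

-- ===== PRECONDITION & SPEC =====
def Spec_alternate_vowel_uppercase (s : String) (out : String) : Prop := out = alternate_vowel_uppercase_alt s
instance (s : String) (out : String) : Decidable (Spec_alternate_vowel_uppercase s out) := by unfold Spec_alternate_vowel_uppercase; infer_instance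

-- ===== CLAIM (what is proved, stated in full; the proofs are below) =====
def Claim_equal_alternate_vowel_uppercase : Prop := ∀ (s : String), Dom_alternate_vowel_uppercase s → Spec_alternate_vowel_uppercase s (alternate_vowel_uppercase s)

-- ===== LEMMAS AND PROOFS =====

-- recursive reading of A's loop (count threaded, result built in front)
def pvGoA : List Char → Int → List Char
  | [], _ => []
  | c :: cs, count =>
    if pvVowels.contains c then
      (if PySem.Int.mod (count + 1) 2 == 0 then PySem.Chars.upperChar c else c) :: pvGoA cs (count + 1)
    else c :: pvGoA cs count

-- relative indices of the vowels of a list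
def pvVpos : List Char → List Nat
  | [] => []
  | c :: cs => if pvVowels.contains c then 0 :: (pvVpos cs).map (· + 1) else (pvVpos cs).map (· + 1)

-- every-other selection: pvSel true keeps elements 0,2,4,…; pvSel false keeps 1,3,5,…
def pvSel {α : Type} : Bool → List α → List α
  | _, [] => []
  | true, x :: t => x :: pvSel false t
  | false, _ :: t => pvSel true t

-- B's update loop as a function of its index list
def pvApplyB (cs : List Char) (idxs : List Int) : List Char :=
  idxs.foldl
    (fun (l : List Char) i =>
      PySem.List.pySetD l i (PySem.Chars.upperChar (PySem.List.pyGetD l i ' '))) cs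

lemma pvFoldA (cs : List Char) :
    ∀ (count : Int) (res : List Char),
      (cs.foldl
        (fun (st : Int × List Char) c =>
          if pvVowels.contains c then
            (st.1 + 1,
             st.2 ++ [if PySem.Int.mod (st.1 + 1) 2 == 0 then PySem.Chars.upperChar c else c])
          else (st.1, st.2 ++ [c])) (count, res)).2 = res ++ pvGoA cs count := by
  induction cs with
  | nil => intro count res; simp [pvGoA]
  | cons c cs ih =>
    intro count res
    by_cases h : pvVowels.contains c
    · simp only [List.foldl_cons, h, if_pos, pvGoA, ih]
      simp
    · simp only [List.foldl_cons, pvGoA, h, ih]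
      simp

lemma pvEnumFilter (cs : List Char) :
    ∀ (n : Int),
      ((PySem.List.enumerate cs n).filter (fun p => pvVowels.contains p.2)).map (·.1)
        = (pvVpos cs).map (fun k : Nat => n + (k : Int)) := by
  induction cs with
  | nil => intro n; simp [PySem.List.enumerate_nil, pvVpos]
  | cons c cs ih =>
    intro n
    have hmap : ((pvVpos cs).map (· + 1)).map (fun k : Nat => n + (k : Int))
        = (pvVpos cs).map (fun k : Nat => (n + 1) + (k : Int)) := by
      rw [List.map_map]; apply List.map_congr_left; intro k _
      simp [Function.comp]; ring
    by_cases h : pvVowels.contains c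
    · simp only [PySem.List.enumerate_cons, List.filter_cons, h, List.map_cons, ih, pvVpos, if_pos]
      rw [hmap]; simp
    · simp only [PySem.List.enumerate_cons, List.filter_cons, pvVpos]
      simp only [h, Bool.false_eq_true, if_false]
      rw [ih]
      exact hmap.symm

lemma pvSel_map {α β : Type} (f : α → β) :
    ∀ (b : Bool) (l : List α), pvSel b (l.map f) = (pvSel b l).map f := by
  intro b l
  induction l generalizing b with
  | nil => cases b <;> simp [pvSel]
  | cons x t ih => cases b <;> simp [pvSel, ih]

lemma pvFilterMapIdx {α : Type} :
    ∀ (t : List α) (b : Bool),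
      List.filterMap (fun k => t[(if b then 2 * k else 2 * k + 1)]?)
          (List.range ((t.length + (if b then 1 else 0)) / 2)) = pvSel b t := by
  intro t
  induction t with
  | nil => intro b; cases b <;> simp [pvSel]
  | cons x t ih =>
    intro b
    cases b
    · simp only [pvSel, List.length_cons, Bool.false_eq_true, if_false, Nat.add_zero]
      calc List.filterMap (fun k => (x :: t)[2 * k + 1]?) (List.range ((t.length + 1) / 2))
          = List.filterMap (fun k => t[2 * k]?) (List.range ((t.length + 1) / 2)) := by
            apply List.filterMap_congr; intro k _; simp
        _ = pvSel true t := by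
            have := ih true
            simpa using this
    · simp only [pvSel, List.length_cons, if_true]
      rw [show (t.length + 1 + 1) / 2 = t.length / 2 + 1 by omega]
      rw [List.range_succ_eq_map]
      simp only [List.filterMap_cons]
      rw [show (2 * 0 : Nat) = 0 by ring]
      simp only [List.getElem?_cons_zero]
      rw [List.filterMap_map]
      have h1 : List.filterMap ((fun k => (x :: t)[2 * k]?) ∘ Nat.succ) (List.range (t.length / 2))
          = List.filterMap (fun k => t[2 * k + 1]?) (List.range (t.length / 2)) := by
        apply List.filterMap_congr; intro k _
        simp only [Function.comp, Nat.succ_eq_add_one]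
        rw [show 2 * (k + 1) = (2 * k + 1) + 1 by ring]
        simp
      rw [h1]
      have h2 := ih false
      simp only [Bool.false_eq_true, if_false, Nat.add_zero] at h2
      rw [h2]

lemma pvSliceTwo {α : Type} (l : List α) :
    PySem.List.slice? l (some 1) none 2 = some (pvSel false l) := by
  cases l with
  | nil => rfl
  | cons a t =>
    simp only [PySem.List.slice?, PySem.List.sliceIndices]
    norm_num
    have hc : (if 0 < t.length then (((t.length : Int) + 2 - 1) / 2).toNat else 0)
        = (t.length + 1) / 2 := by split <;> omega
    rw [hc]
    have hfun : List.filterMap (fun (x : Nat) => (a :: t)[(1 + 2 * (x : Int)).toNat]?)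
          (List.range ((t.length + 1) / 2))
        = List.filterMap (fun x => t[2 * x]?) (List.range ((t.length + 1) / 2)) := by
      apply List.filterMap_congr; intro k _
      rw [show ((1 + 2 * (k : Int)).toNat) = 2 * k + 1 by omega]
      simp
    rw [hfun, show (pvSel false (a :: t)) = pvSel true t from rfl]
    have := pvFilterMapIdx t true
    simpa using this

lemma pvShift (idxs : List Nat) :
    ∀ (d : Char) (cs : List Char),
      pvApplyB (d :: cs) (idxs.map (fun k : Nat => ((k + 1 : Nat) : Int)))
        = d :: pvApplyB cs (idxs.map (fun k : Nat => (k : Int))) := by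
  induction idxs with
  | nil => intro d cs; rfl
  | cons i t ih =>
    intro d cs
    simp only [List.map_cons, pvApplyB, List.foldl_cons]
    have hg : PySem.List.pyGetD (d :: cs) ((i + 1 : Nat) : Int) ' '
        = PySem.List.pyGetD cs (i : Int) ' ' := by
      simp only [PySem.List.pyGetD_natCast]
      simp [List.getD]
    have hs : PySem.List.pySetD (d :: cs) ((i + 1 : Nat) : Int)
          (PySem.Chars.upperChar (PySem.List.pyGetD cs (i : Int) ' '))
        = d :: PySem.List.pySetD cs (i : Int) (PySem.Chars.upperChar (PySem.List.pyGetD cs (i : Int) ' ')) := by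
      simp only [PySem.List.pySetD_natCast]
      simp [List.set]
    rw [hg, hs]
    exact ih d _

lemma pvCompCast : ((fun k : Nat => (k : Int)) ∘ (· + 1)) = (fun k : Nat => ((k + 1 : Nat) : Int)) := by
  funext k; simp

lemma pvMain (cs : List Char) :
    ∀ (count : Int),
      pvGoA cs count
        = pvApplyB cs ((pvSel (decide (count % 2 = 1)) (pvVpos cs)).map (fun k : Nat => (k : Int))) := by
  induction cs with
  | nil => intro count; cases h : decide (count % 2 = 1) <;> simp [pvGoA, pvVpos, pvSel, pvApplyB]
  | cons c cs ih =>
    intro count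
    have hmod : PySem.Int.mod (count + 1) 2 = (count + 1) % 2 :=
      PySem.Int.mod_eq_emod_of_pos (by norm_num)
    by_cases h : pvVowels.contains c
    · by_cases hp : count % 2 = 1
      · -- vowel, count odd: this vowel is uppercased, selection restarts off
        have hsel : pvSel (decide (count % 2 = 1)) (pvVpos (c :: cs))
            = 0 :: pvSel false ((pvVpos cs).map (· + 1)) := by
          rw [show pvVpos (c :: cs) = 0 :: (pvVpos cs).map (· + 1) by
            simp [pvVpos]; simpa using h]
          rw [hp]; rfl
        rw [hsel, pvSel_map, List.map_cons, List.map_map, pvCompCast]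
        simp only [pvApplyB, List.foldl_cons, Nat.cast_zero]
        rw [PySem.List.pyGetD_zero_cons]
        rw [show PySem.List.pySetD (c :: cs) (0 : Int) (PySem.Chars.upperChar c)
            = PySem.Chars.upperChar c :: cs by simp [pysem]]
        have hsh := pvShift (pvSel false (pvVpos cs)) (PySem.Chars.upperChar c) cs
        simp only [pvApplyB] at hsh
        rw [hsh]
        have hup : (PySem.Int.mod (count + 1) 2 == 0) = true := by
          rw [hmod]; simp; omega
        simp only [pvGoA, h, if_pos, hup]
        have h2 : (decide ((count + 1) % 2 = 1)) = false := by simp; omega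
        rw [ih (count + 1), h2]; try rfl
      · -- vowel, count even: this vowel kept, selection starts at the next vowel
        have hsel : pvSel (decide (count % 2 = 1)) (pvVpos (c :: cs))
            = pvSel true ((pvVpos cs).map (· + 1)) := by
          rw [show pvVpos (c :: cs) = 0 :: (pvVpos cs).map (· + 1) by
            simp [pvVpos]; simpa using h]
          rw [show (decide (count % 2 = 1)) = false by simp [hp]]; rfl
        rw [hsel, pvSel_map, List.map_map, pvCompCast]
        rw [show pvApplyB (c :: cs) ((pvSel true (pvVpos cs)).map (fun k : Nat => ((k + 1 : Nat) : Int)))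
            = c :: pvApplyB cs ((pvSel true (pvVpos cs)).map (fun k : Nat => (k : Int))) from
          pvShift _ c cs]
        have hup : (PySem.Int.mod (count + 1) 2 == 0) = false := by
          rw [hmod]; simp; omega
        simp only [pvGoA, h, if_pos, hup, Bool.false_eq_true, if_false]
        have h2 : (decide ((count + 1) % 2 = 1)) = true := by simp; omega
        rw [ih (count + 1), h2]; try rfl
    · -- not a vowel: character copied, state unchanged
      have hsel : pvSel (decide (count % 2 = 1)) (pvVpos (c :: cs))
          = pvSel (decide (count % 2 = 1)) ((pvVpos cs).map (· + 1)) := by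
        rw [show pvVpos (c :: cs) = (pvVpos cs).map (· + 1) by
          simp [pvVpos]; simpa using h]
      rw [hsel, pvSel_map, List.map_map, pvCompCast]
      rw [pvShift (pvSel (decide (count % 2 = 1)) (pvVpos cs)) c cs]
      simp only [pvGoA, h, Bool.false_eq_true, if_false]
      rw [ih count]; try rfl

-- ===== VERDICT (by name: the statement is the Claim_ definition above) =====
theorem alternate_vowel_uppercase_spec : Claim_equal_alternate_vowel_uppercase := by
  intro s _
  unfold Spec_alternate_vowel_uppercase
  unfold alternate_vowel_uppercase alternate_vowel_uppercase_alt
  simp only []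
  show String.ofList ((List.foldl _ (0, []) s.toList).2) = _
  rw [pvFoldA s.toList 0 []]
  rw [pvEnumFilter s.toList 0]
  rw [show (pvVpos s.toList).map (fun k : Nat => (0 : Int) + (k : Int))
      = (pvVpos s.toList).map (fun k : Nat => (k : Int)) by
    apply List.map_congr_left; intro k _; ring]
  rw [pvSliceTwo]
  rw [pvSel_map]
  rw [List.nil_append]
  rw [pvMain s.toList 0]
  rfl
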